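-- pv_equiv track=rewrite | github.com/ohadthenonnavad/ebpf-ext4-kstack-tracer | data_science/kstack_anomaly_detector.py | off_bucket
-- ===== SOURCE A (Python) =====
-- BUCKETS = [(0,1),(2,15),(16,63),(64,255)]  # 0..1, 2..15, 16..63, 64..255, else 256+
--
-- def off_bucket(off_hex: str) -> str:
--     try:
--         s = off_hex.lower().replace("0x","")
--         off = int(s, 16)
--     except Exception:
--         off = 0
--     for i,(a,b) in enumerate(BUCKETS):
--         if a <= off <= b: return str(i)
--     return "4"
-- ===== SOURCE B (Python) =====
-- # B: replaces the linear enumerate-scan over (lo,hi) bucket pairs by a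
-- # binary search over the upper thresholds [2,16,64,256]; negative offsets
-- # fall in no bucket, hence "4".
-- _THRESHOLDS = [2, 16, 64, 256]
--
-- def _bisect_right(a, x):
--     lo, hi = 0, len(a)
--     while lo < hi:
--         mid = (lo + hi) // 2
--         if x < a[mid]:
--             hi = mid
--         else:
--             lo = mid + 1
--     return lo
--
-- def off_bucket(off_hex: str) -> str:
--     try:
--         off = int(off_hex.lower().replace("0x", ""), 16)
--     except Exception:
--         off = 0
--     if off < 0:
--         return "4"
--     return str(_bisect_right(_THRESHOLDS, off))
-- ===== Notes on version B (the rewrite author's own statement) =====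
-- stated objective: alternative
-- what changed: Replaces A's linear enumerate-scan over (lo,hi) bucket pairs with a hand-written binary search (bisect_right) over the list of upper bucket thresholds, with an explicit branch sending negative offsets to the overflow bucket.
import Mathlib
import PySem

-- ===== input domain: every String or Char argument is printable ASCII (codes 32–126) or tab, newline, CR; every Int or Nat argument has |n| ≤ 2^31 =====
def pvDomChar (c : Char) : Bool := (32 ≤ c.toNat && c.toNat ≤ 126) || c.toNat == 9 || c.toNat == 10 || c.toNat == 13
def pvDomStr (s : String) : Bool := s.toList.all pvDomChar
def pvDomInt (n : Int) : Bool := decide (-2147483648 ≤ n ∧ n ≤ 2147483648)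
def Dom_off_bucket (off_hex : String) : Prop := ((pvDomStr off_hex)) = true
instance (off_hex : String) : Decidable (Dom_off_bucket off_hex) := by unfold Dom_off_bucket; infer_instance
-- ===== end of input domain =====

-- B replaces A's linear enumerate-scan over (lo,hi) bucket pairs by a binary
-- search over the upper thresholds (objective: alternative lookup structure).

-- ===== PORT A =====
-- BUCKETS = [(0,1),(2,15),(16,63),(64,255)]
def pvBUCKETS : List (Int × Int) := [(0,1),(2,15),(16,63),(64,255)]

-- the 'for i,(a,b) in enumerate(BUCKETS): if a <= off <= b: return str(i)' loop
def pvScan (off : Int) : List (Int × Int × Int) → String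
  | [] => "4"
  | (i, a, b) :: rest =>
      if a ≤ off ∧ off ≤ b then PySem.Int.toStr i else pvScan off rest

def off_bucket (off_hex : String) : String :=
  -- try: s = off_hex.lower().replace("0x",""); off = int(s,16)  except: off = 0
  let s := PySem.Str.replace (PySem.Str.lower off_hex) "0x" ""
  let off := (PySem.Int.ofStrBase? s 16).getD 0
  pvScan off (PySem.List.enumerate pvBUCKETS)

-- ===== PORT B =====
def pvTHRESHOLDS : List Int := [2, 16, 64, 256]

-- hand-written bisect_right: while lo < hi: mid=(lo+hi)//2; if x < a[mid]: hi=mid else lo=mid+1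
-- (the last Nat is fuel, a totality guard only: hi - lo shrinks each iteration,
-- so fuel = a.length is always enough)
def pvBisectRight (a : List Int) (x : Int) : Nat → Nat → Nat → Nat
  | lo, _, 0 => lo
  | lo, hi, Nat.succ fuel =>
      if lo < hi then
        if x < a.getD ((lo + hi) / 2) 0 then pvBisectRight a x lo ((lo + hi) / 2) fuel
        else pvBisectRight a x ((lo + hi) / 2 + 1) hi fuel
      else lo

def off_bucket_alt (off_hex : String) : String :=
  let off := (PySem.Int.ofStrBase? (PySem.Str.replace (PySem.Str.lower off_hex) "0x" "") 16).getD 0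
  if off < 0 then "4"
  else PySem.Int.toStr (Int.ofNat (pvBisectRight pvTHRESHOLDS off 0 pvTHRESHOLDS.length pvTHRESHOLDS.length))

-- ===== PRECONDITION & SPEC =====
def Spec_off_bucket (off_hex : String) (out : String) : Prop := out = off_bucket_alt off_hex
instance (off_hex : String) (out : String) : Decidable (Spec_off_bucket off_hex out) := by unfold Spec_off_bucket; infer_instance

-- ===== CLAIM (what is proved, stated in full; the proofs are below) =====
def Claim_equal_off_bucket : Prop := ∀ (off_hex : String), Dom_off_bucket off_hex → Spec_off_bucket off_hex (off_bucket off_hex)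

-- ===== LEMMAS AND PROOFS =====

-- both sides of the parse produce the same integer; the claim reduces to the buckets
theorem pv_key (off : Int) :
    pvScan off (PySem.List.enumerate pvBUCKETS)
      = if off < 0 then "4"
        else PySem.Int.toStr (Int.ofNat (pvBisectRight pvTHRESHOLDS off 0 pvTHRESHOLDS.length pvTHRESHOLDS.length)) := by
  have h4 : pvBisectRight pvTHRESHOLDS off 0 pvTHRESHOLDS.length pvTHRESHOLDS.length
      = if off < 2 then 0 else if off < 16 then 1 else if off < 64 then 2
        else if off < 256 then 3 else 4 := by
    norm_num [pvTHRESHOLDS, pvBisectRight]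
    split_ifs <;> omega
  rw [h4]
  simp only [pvBUCKETS, PySem.List.enumerate_cons, PySem.List.enumerate_nil, pvScan]
  split_ifs <;> first | rfl | omega

-- ===== VERDICT (by name: the statement is the Claim_ definition above) =====
theorem off_bucket_spec : Claim_equal_off_bucket := by
  intro off_hex _
  unfold Spec_off_bucket off_bucket off_bucket_alt
  exact pv_key _
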